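-- pv_equiv track=rewrite | github.com/zhangkai98/ProgrammingForThePuzzledBook | Puzzle18/maxsum-myexercise2.py | coinsIterative
-- ===== SOURCE A (Python) =====
-- def coinsIterative(row):
--     #table[i] contains the optimum output for the LAST i coins
--     table = {}
--     table[0] = (0, 1)
--     table[1] = (row[-1], 2)
--     table[2] = (row[-1] + row[-2], 3)
--     for i in range(3, len(row) + 1):
--         skip = table[i-1][0]
--         pickThenjump = table[i-2][0] + row[-i]
--         pickTwo = (table[i-4][0] if i>4 else 0) + row[-(i-1)] + row[-i]
--         result = max(skip, pickThenjump, pickTwo)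
--         scheme = [skip, pickThenjump, pickTwo].index(result) + 1
--         table[i] = (result, scheme)
--     return (table[len(row)], table)
-- ===== SOURCE B (Python) =====
-- def coinsIterative(row):
--     # Demand-driven (top-down) evaluation with an explicit worklist stack instead
--     # of A's bottom-up for-loop: entries are computed only when requested and
--     # missing dependencies are pushed onto the stack.
--     table = {0: (0, 1), 1: (row[-1], 2), 2: (row[-1] + row[-2], 3)}
--     n = len(row)
--     stack = [n]
--     while stack:
--         i = stack[-1]
--         if i in table:
--             stack.pop()
--             continue
--         if i - 1 not in table:
--             stack.append(i - 1)
--             continue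
--         skip = table[i-1][0]
--         pickThenjump = table[i-2][0] + row[-i]
--         pickTwo = (table[i-4][0] if i > 4 else 0) + row[-(i-1)] + row[-i]
--         result = max(skip, pickThenjump, pickTwo)
--         scheme = [skip, pickThenjump, pickTwo].index(result) + 1
--         table[i] = (result, scheme)
--         stack.pop()
--     return (table[n], table)
-- ===== Notes on version B (the rewrite author's own statement) =====
-- stated objective: alternative
-- what changed: Replaces A's bottom-up for-loop over table indices by demand-driven top-down evaluation: an explicit worklist stack starts from len(row) and pushes missing dependencies until each entry can be memoized.
import Mathlib
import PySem

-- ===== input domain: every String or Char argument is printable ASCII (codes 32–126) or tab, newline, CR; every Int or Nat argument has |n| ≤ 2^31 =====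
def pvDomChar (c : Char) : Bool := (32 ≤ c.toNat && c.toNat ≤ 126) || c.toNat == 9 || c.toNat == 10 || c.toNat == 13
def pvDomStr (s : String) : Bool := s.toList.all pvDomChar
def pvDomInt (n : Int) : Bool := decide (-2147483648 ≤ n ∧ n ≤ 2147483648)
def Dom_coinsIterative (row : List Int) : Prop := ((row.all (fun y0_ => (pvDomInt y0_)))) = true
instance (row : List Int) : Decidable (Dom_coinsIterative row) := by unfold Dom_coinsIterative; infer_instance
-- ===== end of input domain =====

-- B replaces A's bottom-up for-loop over the table by demand-driven (top-down) evaluation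
-- with an explicit worklist stack that pushes missing dependencies; same values, same table.


-- ===== PORT A =====
def stepA (row : List Int) (t : PySem.Dict Int (Int × Int)) (i : Int) : PySem.Dict Int (Int × Int) :=
  let skip := (t.getD (i - 1) (0, 0)).1
  let pickThenjump := (t.getD (i - 2) (0, 0)).1 + PySem.List.pyGetD row (-i) 0
  let pickTwo := (if i > 4 then (t.getD (i - 4) (0, 0)).1 else 0)
      + PySem.List.pyGetD row (-(i - 1)) 0 + PySem.List.pyGetD row (-i) 0
  let result := max (max skip pickThenjump) pickTwo
  let scheme : Int := (((PySem.List.index? [skip, pickThenjump, pickTwo] result).getD 0 : Nat) : Int) + 1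
  t.insert i (result, scheme)

def seedA (row : List Int) : PySem.Dict Int (Int × Int) :=
  ((PySem.Dict.empty.insert 0 (0, 1)).insert 1 (PySem.List.pyGetD row (-1) 0, 2)).insert 2
    (PySem.List.pyGetD row (-1) 0 + PySem.List.pyGetD row (-2) 0, 3)

def coinsIterative (row : List Int) : (Int × Int) × (List (Int × Int × Int)) :=
  let t := (PySem.List.pyRange 3 ((row.length : Int) + 1) 1).foldl (stepA row) (seedA row)
  (t.getD (row.length : Int) (0, 0), t.items)


-- ===== PORT B =====
def seedB (row : List Int) : PySem.Dict Int (Int × Int) :=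
  PySem.Dict.ofList [(0, (0, 1)), (1, (PySem.List.pyGetD row (-1) 0, 2)),
    (2, (PySem.List.pyGetD row (-1) 0 + PySem.List.pyGetD row (-2) 0, 3))]

-- the while-loop: stack of pending keys; fuel is only a totality guard (the Python loop terminates)
def loopB (row : List Int) : Nat → List Int → PySem.Dict Int (Int × Int) → PySem.Dict Int (Int × Int)
  | 0, _, t => t
  | _ + 1, [], t => t
  | f + 1, i :: rest, t =>
    if t.contains i then loopB row f rest t
    else if ¬ t.contains (i - 1) then loopB row f ((i - 1) :: i :: rest) t
    else
      let skip := (t.getD (i - 1) (0, 0)).1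
      let pickThenjump := (t.getD (i - 2) (0, 0)).1 + PySem.List.pyGetD row (-i) 0
      let pickTwo := (if i > 4 then (t.getD (i - 4) (0, 0)).1 else 0)
          + PySem.List.pyGetD row (-(i - 1)) 0 + PySem.List.pyGetD row (-i) 0
      let result := max (max skip pickThenjump) pickTwo
      let scheme : Int := (((PySem.List.index? [skip, pickThenjump, pickTwo] result).getD 0 : Nat) : Int) + 1
      loopB row f rest (t.insert i (result, scheme))

def coinsIterative_alt (row : List Int) : (Int × Int) × (List (Int × Int × Int)) :=
  let n := row.length
  let t := loopB row (2 * n + 10) [(n : Int)] (seedB row)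
  (t.getD (n : Int) (0, 0), t.items)


-- ===== PRECONDITION & SPEC =====
-- Pre_ excludes rows of length < 2, on which the Python A raises IndexError (row[-1]/row[-2]).
def Pre_coinsIterative (row : List Int) : Prop := 2 ≤ row.length
instance (row : List Int) : Decidable (Pre_coinsIterative row) := by unfold Pre_coinsIterative; infer_instance
def pvWitness_coinsIterative : List Int := [1, 2, 3]

def Spec_coinsIterative (row : List Int) (out : (Int × Int) × (List (Int × Int × Int))) : Prop := out = coinsIterative_alt row
instance (row : List Int) (out : (Int × Int) × (List (Int × Int × Int))) : Decidable (Spec_coinsIterative row out) := by unfold Spec_coinsIterative; infer_instance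

-- ===== CLAIM (what is proved, stated in full; the proofs are below) =====
def Claim_equal_coinsIterative : Prop := ∀ (row : List Int), Dom_coinsIterative row → Pre_coinsIterative row → Spec_coinsIterative row (coinsIterative row)

-- ===== LEMMAS AND PROOFS =====

-- the common DP entry both programs store at key i given table t
def entry (row : List Int) (t : PySem.Dict Int (Int × Int)) (i : Int) : Int × Int :=
  let skip := (t.getD (i - 1) (0, 0)).1
  let pickThenjump := (t.getD (i - 2) (0, 0)).1 + PySem.List.pyGetD row (-i) 0
  let pickTwo := (if i > 4 then (t.getD (i - 4) (0, 0)).1 else 0)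
      + PySem.List.pyGetD row (-(i - 1)) 0 + PySem.List.pyGetD row (-i) 0
  let result := max (max skip pickThenjump) pickTwo
  let scheme : Int := (((PySem.List.index? [skip, pickThenjump, pickTwo] result).getD 0 : Nat) : Int) + 1
  (result, scheme)

-- reference table contents: the list of values at keys 0 .. m+2
def Rlist (row : List Int) : Nat → List (Int × Int)
  | 0 => [(0, 1), (PySem.List.pyGetD row (-1) 0, 2),
      (PySem.List.pyGetD row (-1) 0 + PySem.List.pyGetD row (-2) 0, 3)]
  | m + 1 => Rlist row m
      ++ [entry row (PySem.Dict.ofList (PySem.List.enumerate (Rlist row m))) ((m : Int) + 3)]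

def Tdict (row : List Int) (m : Nat) : PySem.Dict Int (Int × Int) :=
  PySem.Dict.ofList (PySem.List.enumerate (Rlist row m))

lemma length_Rlist (row : List Int) (m : Nat) : (Rlist row m).length = m + 3 := by
  induction m with
  | zero => rfl
  | succ m ih => simp [Rlist, ih]

lemma enumerate_append_singleton (R : List (Int × Int)) (e : Int × Int) (s : Int) :
    PySem.List.enumerate (R ++ [e]) s = PySem.List.enumerate R s ++ [(s + R.length, e)] := by
  induction R generalizing s with
  | nil => simp [PySem.List.enumerate_cons, PySem.List.enumerate_nil]
  | cons x xs ih =>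
    simp only [List.cons_append, PySem.List.enumerate_cons, ih (s + 1), List.length_cons]
    have : s + 1 + (xs.length : Int) = s + ((xs.length + 1 : Nat) : Int) := by push_cast; ring
    rw [this]

lemma items_ofList_enumerate (R : List (Int × Int)) :
    (PySem.Dict.ofList (PySem.List.enumerate R)).items = PySem.List.enumerate R := by
  show (List.foldl (fun d p => d.insert p.1 p.2) PySem.Dict.empty (PySem.List.enumerate R)).items
      = PySem.List.enumerate R
  rw [PySem.Dict.items_foldl_insert_fresh (PySem.List.enumerate R) (·.1) (·.2) PySem.Dict.empty
    (by intro a _; exact PySem.Dict.contains_empty _)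
    (by rw [PySem.List.map_fst_enumerate]; simpa using PySem.List.nodup_pyRange_one 0 (0 + R.length))]
  show PySem.Dict.items PySem.Dict.empty ++ _ = _
  simp [PySem.Dict.empty]

lemma keys_eq_ofList_enumerate (R : List (Int × Int)) :
    (PySem.Dict.ofList (PySem.List.enumerate R)).keys = (PySem.List.enumerate R).map (·.1) := by
  show (PySem.Dict.ofList (PySem.List.enumerate R)).items.map (·.1) = _
  rw [items_ofList_enumerate]

lemma contains_ofList_enumerate (R : List (Int × Int)) (j : Int) :
    (PySem.Dict.ofList (PySem.List.enumerate R)).contains j = true ↔ 0 ≤ j ∧ j < R.length := by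
  rw [PySem.Dict.contains_iff_mem_keys, keys_eq_ofList_enumerate, PySem.List.map_fst_enumerate,
    PySem.List.mem_pyRange_one]
  omega

lemma insert_ofList_enumerate (R : List (Int × Int)) (e : Int × Int) :
    (PySem.Dict.ofList (PySem.List.enumerate R)).insert (R.length : Int) e
      = PySem.Dict.ofList (PySem.List.enumerate (R ++ [e])) := by
  apply PySem.Dict.ext
  have hnc : (PySem.Dict.ofList (PySem.List.enumerate R)).contains (R.length : Int) = false := by
    rw [← Bool.not_eq_true, PySem.Dict.contains_iff_mem_keys, keys_eq_ofList_enumerate,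
      PySem.List.map_fst_enumerate]
    intro hmem
    have h2 := PySem.List.mem_pyRange_one.1 hmem
    omega
  rw [PySem.Dict.items_insert_of_not_contains _ _ hnc, items_ofList_enumerate,
    items_ofList_enumerate, enumerate_append_singleton]
  simp

lemma contains_Tdict (row : List Int) (m : Nat) (j : Int) :
    (Tdict row m).contains j = true ↔ 0 ≤ j ∧ j < (m : Int) + 3 := by
  rw [Tdict, contains_ofList_enumerate, length_Rlist]
  omega

lemma Tdict_succ (row : List Int) (m : Nat) :
    Tdict row (m + 1) = (Tdict row m).insert ((m : Int) + 3) (entry row (Tdict row m) ((m : Int) + 3)) := by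
  have h : ((Rlist row m).length : Int) = (m : Int) + 3 := by rw [length_Rlist]; push_cast; ring
  rw [Tdict, Rlist, ← h,
    show Tdict row m = PySem.Dict.ofList (PySem.List.enumerate (Rlist row m)) from rfl,
    insert_ofList_enumerate]

lemma stepA_eq (row : List Int) (t : PySem.Dict Int (Int × Int)) (i : Int) :
    stepA row t i = t.insert i (entry row t i) := rfl

lemma seedA_eq (row : List Int) : seedA row = Tdict row 0 := by
  apply PySem.Dict.ext
  rw [Tdict, items_ofList_enumerate]
  rfl

lemma seedB_eq (row : List Int) : seedB row = Tdict row 0 := by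
  apply PySem.Dict.ext
  rw [Tdict, items_ofList_enumerate]
  rfl

-- ===== A-side: the foldl builds Tdict =====
def aFold (row : List Int) (m : Nat) : PySem.Dict Int (Int × Int) :=
  (PySem.List.pyRange 3 (3 + (m : Int)) 1).foldl (stepA row) (seedA row)

lemma aFold_succ (row : List Int) (m : Nat) :
    aFold row (m + 1) = stepA row (aFold row m) (3 + (m : Int)) := by
  unfold aFold
  have : (3 + ((m + 1 : Nat) : Int)) = (3 + (m : Int)) + 1 := by push_cast; ring
  rw [this, PySem.List.pyRange_one_succ_right (by omega)]
  simp

lemma aFold_eq (row : List Int) (m : Nat) : aFold row m = Tdict row m := by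
  induction m with
  | zero =>
    show (PySem.List.pyRange 3 (3 + (0 : Int)) 1).foldl (stepA row) (seedA row) = _
    norm_num
    exact seedA_eq row
  | succ m ih =>
    rw [aFold_succ, ih, stepA_eq, show (3 + (m : Int)) = (m : Int) + 3 by ring, ← Tdict_succ]

-- ===== B-side: the worklist loop fills Tdict =====
def costB : Nat → Nat
  | 0 => 1
  | 1 => 1
  | d + 2 => costB (d + 1) + 2

lemma costB_le (d : Nat) : costB d ≤ 2 * d + 1 := by
  induction d with
  | zero => simp [costB]
  | succ d ih =>
    match d with
    | 0 => simp [costB]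
    | e + 1 => rw [costB]; omega

lemma costB_pos (d : Nat) : 1 ≤ costB d := by
  match d with
  | 0 => simp [costB]
  | 1 => simp [costB]
  | e + 2 => rw [costB]; omega

lemma loopB_nil (row : List Int) (fuel : Nat) (t : PySem.Dict Int (Int × Int)) :
    loopB row fuel [] t = t := by
  cases fuel <;> rfl

lemma fillB (row : List Int) (d : Nat) :
    ∀ (m fuel : Nat) (rest : List Int), costB d ≤ fuel →
      loopB row fuel (((m + 2 + d : Nat) : Int) :: rest) (Tdict row m)
        = loopB row (fuel - costB d) rest (Tdict row (m + d)) := by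
  induction d using Nat.strong_induction_on with
  | _ d ih =>
    intro m fuel rest hfuel
    obtain ⟨f, rfl⟩ : ∃ f, fuel = f + 1 := ⟨fuel - 1, by have := costB_pos d; omega⟩
    match d with
    | 0 =>
      have hc : (Tdict row m).contains ((m + 2 + 0 : Nat) : Int) = true := by
        rw [contains_Tdict]; push_cast; omega
      simp only [loopB, hc, if_true, costB]
      simp
    | 1 =>
      have hc : (Tdict row m).contains ((m + 2 + 1 : Nat) : Int) = false := by
        rw [← Bool.not_eq_true, contains_Tdict]; push_cast; omega
      have hc1 : (Tdict row m).contains (((m + 2 + 1 : Nat) : Int) - 1) = true := by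
        rw [contains_Tdict]; push_cast; omega
      simp only [loopB, hc, hc1, Bool.false_eq_true, if_false, not_true]
      have he : ((m + 2 + 1 : Nat) : Int) = (m : Int) + 3 := by push_cast; ring
      rw [he]
      show loopB row f rest ((Tdict row m).insert ((m : Int) + 3) (entry row (Tdict row m) ((m : Int) + 3)))
          = loopB row (f + 1 - costB 1) rest (Tdict row (m + 1))
      rw [← Tdict_succ]
      simp [costB]
    | e + 2 =>
      have hc : (Tdict row m).contains ((m + 2 + (e + 2) : Nat) : Int) = false := by
        rw [← Bool.not_eq_true, contains_Tdict]; push_cast; omega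
      have hc1 : (Tdict row m).contains (((m + 2 + (e + 2) : Nat) : Int) - 1) = false := by
        rw [← Bool.not_eq_true, contains_Tdict]; push_cast; omega
      simp only [loopB, hc, hc1, Bool.false_eq_true, if_false, not_false_iff, if_true]
      have he : ((m + 2 + (e + 2) : Nat) : Int) - 1 = ((m + 2 + (e + 1) : Nat) : Int) := by
        push_cast; ring
      have hle1 : costB (e + 1) ≤ f := by rw [costB] at hfuel; omega
      rw [he, ih (e + 1) (by omega) m f _ hle1]
      have he2 : ((m + 2 + (e + 2) : Nat) : Int) = (((m + (e + 1)) + 2 + 1 : Nat) : Int) := by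
        push_cast; ring
      have hle2 : costB 1 ≤ f - costB (e + 1) := by
        have := costB_le (e + 1); rw [costB] at hfuel; simp [costB]; omega
      rw [he2, ih 1 (by omega) (m + (e + 1)) (f - costB (e + 1)) rest hle2]
      have : m + (e + 1) + 1 = m + (e + 2) := by ring
      rw [this]
      congr 1
      simp [costB]
      omega

-- ===== final equality =====
lemma final (row : List Int) (hpre : 2 ≤ row.length) :
    coinsIterative row = coinsIterative_alt row := by
  set n := row.length with hn
  have hA : (PySem.List.pyRange 3 ((row.length : Int) + 1) 1).foldl (stepA row) (seedA row)
      = Tdict row (n - 2) := by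
    have : ((row.length : Int) + 1) = 3 + ((n - 2 : Nat) : Int) := by
      rw [← hn]; omega
    rw [this]
    exact aFold_eq row (n - 2)
  have hB : loopB row (2 * n + 10) [(n : Int)] (seedB row) = Tdict row (n - 2) := by
    rw [seedB_eq]
    have he : (n : Int) = ((0 + 2 + (n - 2) : Nat) : Int) := by push_cast; omega
    have hfuel : costB (n - 2) ≤ 2 * n + 10 := by have := costB_le (n - 2); omega
    rw [he, fillB row (n - 2) 0 (2 * n + 10) [] hfuel, loopB_nil]
    norm_num
  simp only [coinsIterative, coinsIterative_alt]
  rw [hA, hB]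

-- ===== VERDICT (by name: the statement is the Claim_ definition above) =====
theorem coinsIterative_spec : Claim_equal_coinsIterative := by
  intro row _hdom hpre
  exact final row hpre
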